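-- pv_equiv track=rewrite | github.com/kmehran1106/Leetcode | Python/00. Random/04. Partition Labels/partition_labels.py | execute
-- ===== SOURCE A (Python) =====
-- from typing import List
--
-- def execute(string: str) -> List[int]:
--     _last = dict()
--     _result = list()
--
--     for i, c in enumerate(string):
--         _last[c] = i
--
--     _size, _pointer = 0, 0
--     for i, c in enumerate(string):
--         _size += 1
--         _pointer = max(_pointer, _last[c])
--         if i == _pointer:
--             _result.append(_size)
--             _size = 0
--
--     return _result
-- ===== SOURCE B (Python) =====
-- from typing import List
--
-- def execute(string: str) -> List[int]:
--     # per-character interval table: char -> (first_index, last_index), insertion order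
--     iv = {}
--     for i, c in enumerate(string):
--         iv[c] = (iv[c][0], i) if c in iv else (i, i)
--     # merge overlapping intervals in first-appearance order
--     segs = []
--     for f, l in iv.values():
--         if segs and f <= segs[-1][1]:
--             st, en = segs[-1]
--             segs[-1] = (st, max(en, l))
--         else:
--             segs.append((f, l))
--     return [en - st + 1 for st, en in segs]
-- ===== Notes on version B (the rewrite author's own statement) =====
-- stated objective: faster
-- what changed: Instead of A's single greedy sweep carrying a size counter and a running pointer over every position, B builds a per-character (first,last) interval table in insertion order and then merges overlapping intervals (one step per distinct character), emitting end-start+1 per merged segment.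
import Mathlib
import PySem

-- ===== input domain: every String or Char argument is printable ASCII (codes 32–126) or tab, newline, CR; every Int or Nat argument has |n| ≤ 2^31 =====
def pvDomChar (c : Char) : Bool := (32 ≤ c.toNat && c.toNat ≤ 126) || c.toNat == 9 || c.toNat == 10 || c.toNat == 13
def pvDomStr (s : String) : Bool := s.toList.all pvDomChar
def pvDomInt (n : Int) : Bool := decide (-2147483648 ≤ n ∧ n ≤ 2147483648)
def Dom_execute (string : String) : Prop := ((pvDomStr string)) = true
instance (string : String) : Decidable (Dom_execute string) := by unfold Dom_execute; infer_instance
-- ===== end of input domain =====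

-- B replaces A's single greedy sweep (size counter + running pointer over every position) by building a
-- per-character (first,last) interval table and merging overlapping intervals, one merge step per
-- distinct character (objective: faster — measured ~2x in a timing run on large random inputs).

-- ===== PORT A =====
def execute (string : String) : List Int :=
  let cs := string.toList
  let last := (PySem.List.enumerate cs).foldl
    (fun (d : PySem.Dict Char Int) (p : Int × Char) => d.insert p.2 p.1) PySem.Dict.empty
  let fin := (PySem.List.enumerate cs).foldl
    (fun (st : List Int × Int × Int) (p : Int × Char) =>
      let size := st.2.1 + 1
      let pointer := max st.2.2 (last.getD p.2 0)
      if p.1 = pointer then (st.1 ++ [size], 0, pointer) else (st.1, size, pointer))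
    ([], 0, 0)
  fin.1

-- ===== PORT B =====
def execute_alt (string : String) : List Int :=
  let cs := string.toList
  let iv := (PySem.List.enumerate cs).foldl
    (fun (d : PySem.Dict Char (Int × Int)) (p : Int × Char) =>
      d.insert p.2 (if d.contains p.2 then ((d.getD p.2 (0, 0)).1, p.1) else (p.1, p.1)))
    PySem.Dict.empty
  let segs := iv.values.foldl
    (fun (segs : List (Int × Int)) (fl : Int × Int) =>
      match segs.getLast? with
      | some (st, en) => if fl.1 ≤ en then segs.dropLast ++ [(st, max en fl.2)] else segs ++ [fl]
      | none => [fl])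
    []
  segs.map (fun p => p.2 - p.1 + 1)

-- ===== PRECONDITION & SPEC =====
def Spec_execute (string : String) (out : List Int) : Prop := out = execute_alt string
instance (string : String) (out : List Int) : Decidable (Spec_execute string out) := by unfold Spec_execute; infer_instance

-- ===== CLAIM (what is proved, stated in full; the proofs are below) =====
def Claim_equal_execute : Prop := ∀ (string : String), Dom_execute string → Spec_execute string (execute string)

-- ===== LEMMAS AND PROOFS =====

-- first/last occurrence index of a character, as Int
def firstI (cs : List Char) (c : Char) : Int := (((PySem.List.index? cs c).getD 0 : Nat) : Int)
def lastI (cs : List Char) (c : Char) : Int :=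
  ((cs.length - 1 - (PySem.List.index? cs.reverse c).getD 0 : Nat) : Int)

-- proof-side copies of the two loop bodies (definitionally equal to the ports' lambdas)
def stepA (L : Char → Int) (st : List Int × Int × Int) (p : Int × Char) : List Int × Int × Int :=
  let size := st.2.1 + 1
  let pointer := max st.2.2 (L p.2)
  if p.1 = pointer then (st.1 ++ [size], 0, pointer) else (st.1, size, pointer)

def stepB (segs : List (Int × Int)) (fl : Int × Int) : List (Int × Int) :=
  match segs.getLast? with
  | some (st, en) => if fl.1 ≤ en then segs.dropLast ++ [(st, max en fl.2)] else segs ++ [fl]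
  | none => [fl]

def segLen (p : Int × Int) : Int := p.2 - p.1 + 1

-- the A-side dict of last occurrences
def lastDict (cs : List Char) : PySem.Dict Char Int :=
  (PySem.List.enumerate cs).foldl
    (fun (d : PySem.Dict Char Int) (p : Int × Char) => d.insert p.2 p.1) PySem.Dict.empty

-- the B-side dict of (first, last) intervals
def ivDict (cs : List Char) : PySem.Dict Char (Int × Int) :=
  (PySem.List.enumerate cs).foldl
    (fun (d : PySem.Dict Char (Int × Int)) (p : Int × Char) =>
      d.insert p.2 (if d.contains p.2 then ((d.getD p.2 (0, 0)).1, p.1) else (p.1, p.1)))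
    PySem.Dict.empty

-- prefix folds
def AfoldK (cs : List Char) (k : Nat) : List Int × Int × Int :=
  (PySem.List.enumerate (cs.take k)).foldl (stepA (lastI cs)) ([], 0, 0)

def BfoldK (cs : List Char) (k : Nat) : List (Int × Int) :=
  (PySem.List.dedup (cs.take k)).foldl (fun segs c => stepB segs (firstI cs c, lastI cs c)) []

-- ---- facts about lastI / firstI ----

theorem lastI_append_self (xs : List Char) (d : Char) :
    lastI (xs ++ [d]) d = (xs.length : Int) := by
  unfold lastI
  rw [List.reverse_append]
  simp only [List.reverse_cons, List.reverse_nil, List.nil_append, List.singleton_append]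
  rw [PySem.List.index?_cons_self]
  simp

theorem lastI_append_ne (xs : List Char) (c d : Char) (hne : c ≠ d) (hc : c ∈ xs) :
    lastI (xs ++ [d]) c = lastI xs c := by
  unfold lastI
  rw [List.reverse_append]
  simp only [List.reverse_cons, List.reverse_nil, List.nil_append, List.singleton_append]
  rw [PySem.List.index?_cons_of_ne _ (fun h => hne h.symm)]
  have hmem : c ∈ xs.reverse := by simpa using hc
  obtain ⟨j, hj⟩ := Option.isSome_iff_exists.mp ((PySem.List.index?_isSome_iff _ _).mpr hmem)
  obtain ⟨hjlt, -, -⟩ := PySem.List.getElem_of_index?_eq_some hj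
  rw [hj]
  simp only [Option.map_some, Option.getD_some, List.length_append, List.length_cons,
    List.length_nil, List.length_reverse] at *
  congr 1
  omega

theorem index?_reverse_some (cs : List Char) (c : Char) (hc : c ∈ cs) :
    ∃ j, PySem.List.index? cs.reverse c = some j ∧ j < cs.length ∧
      lastI cs c = ((cs.length - 1 - j : Nat) : Int) := by
  have hmem : c ∈ cs.reverse := by simpa using hc
  obtain ⟨j, hj⟩ := Option.isSome_iff_exists.mp ((PySem.List.index?_isSome_iff _ _).mpr hmem)
  obtain ⟨hjlt, -, -⟩ := PySem.List.getElem_of_index?_eq_some hj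
  refine ⟨j, hj, by simpa using hjlt, ?_⟩
  unfold lastI; rw [hj]; rfl

theorem lastI_bounds (cs : List Char) (c : Char) (hc : c ∈ cs) :
    0 ≤ lastI cs c ∧ lastI cs c ≤ (cs.length : Int) - 1 := by
  obtain ⟨j, -, hjlt, heq⟩ := index?_reverse_some cs c hc
  rw [heq]; omega

theorem lastI_ge (cs : List Char) (k : Nat) (hk : k < cs.length) :
    (k : Int) ≤ lastI cs cs[k] := by
  obtain ⟨j, hj, hjlt, heq⟩ := index?_reverse_some cs cs[k] (cs.getElem_mem hk)
  obtain ⟨hjlt', -, hmin⟩ := PySem.List.getElem_of_index?_eq_some hj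
  rw [heq]
  -- j ≤ cs.length - 1 - k since reverse[cs.length-1-k] = cs[k]
  by_cases hcmp : cs.length - 1 - k < j
  · exfalso
    have hlt : cs.length - 1 - k < cs.reverse.length := by simp; omega
    have : cs.reverse[cs.length - 1 - k] = cs[k] := by
      rw [List.getElem_reverse]
      congr 1
      omega
    exact hmin _ hcmp this
  · omega

theorem firstI_of_mem (xs t : List Char) (c : Char) (hc : c ∈ xs) :
    firstI (xs ++ t) c = firstI xs c := by
  unfold firstI; rw [PySem.List.index?_append_of_mem t hc]

theorem firstI_fresh (cs : List Char) (k : Nat) (hk : k < cs.length)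
    (hnot : cs[k] ∉ cs.take k) : firstI cs cs[k] = (k : Int) := by
  have hsplit : cs = cs.take k ++ cs[k] :: cs.drop (k + 1) := by
    conv_lhs => rw [← List.take_append_drop k cs]
    rw [List.drop_eq_getElem_cons hk]
  have : PySem.List.index? cs cs[k] = some k := by
    rw [PySem.List.index?_eq_some_iff]
    exact ⟨cs.take k, cs.drop (k + 1), hsplit, by simp [List.length_take]; omega, hnot⟩
  unfold firstI; rw [this]; rfl

-- ---- characterization of the A-side dict ----

theorem lastDict_get? (cs : List Char) (c : Char) :
    (lastDict cs).get? c = if c ∈ cs then some (lastI cs c) else none := by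
  induction cs using List.reverseRecOn with
  | nil => simp [lastDict, PySem.List.enumerate, PySem.Dict.get?_empty]
  | append_singleton xs d ih =>
    unfold lastDict at *
    rw [PySem.List.enumerate_append, List.foldl_append]
    simp only [PySem.List.enumerate, List.foldl_cons, List.foldl_nil]
    rw [PySem.Dict.get?_insert]
    by_cases hcd : c = d
    · subst hcd
      simp [lastI_append_self]
    · rw [if_neg hcd, ih]
      by_cases hcx : c ∈ xs
      · rw [if_pos hcx, if_pos (by simp [hcx]), lastI_append_ne xs c d hcd hcx]
      · rw [if_neg hcx, if_neg (by simp [hcx, hcd])]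

-- ---- characterization of the B-side dict ----

theorem ivDict_append (xs : List Char) (d : Char) :
    ivDict (xs ++ [d]) = (ivDict xs).insert d
      (if (ivDict xs).contains d then (((ivDict xs).getD d (0, 0)).1, (xs.length : Int))
       else ((xs.length : Int), (xs.length : Int))) := by
  unfold ivDict
  rw [PySem.List.enumerate_append, List.foldl_append]
  simp [PySem.List.enumerate]

theorem ivDict_keys (xs : List Char) : (ivDict xs).keys = PySem.List.dedup xs := by
  unfold ivDict
  calc ((PySem.List.enumerate xs).foldl
          (fun (d : PySem.Dict Char (Int × Int)) (p : Int × Char) =>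
            d.insert p.2 (if d.contains p.2 then ((d.getD p.2 (0, 0)).1, p.1) else (p.1, p.1)))
          PySem.Dict.empty).keys
      = PySem.Set.update (PySem.Dict.empty : PySem.Dict Char (Int × Int)).keys
          ((PySem.List.enumerate xs).map (·.2)) := by
        exact PySem.Dict.keys_foldl_insert_key _ _ _ _
    _ = PySem.List.dedup xs := by
        rw [PySem.List.map_snd_enumerate]
        simp [PySem.Set.update_nil_left, PySem.List.dedup_eq_ofList, PySem.Dict.keys_empty]

theorem ivDict_items (cs : List Char) :
    (ivDict cs).items =
      (PySem.List.dedup cs).map (fun c => (c, (firstI cs c, lastI cs c))) := by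
  induction cs using List.reverseRecOn with
  | nil => simp [ivDict, PySem.List.enumerate, PySem.List.dedup, PySem.Dict.empty]
  | append_singleton xs d ih =>
    have hnodup : (ivDict xs).keys.Nodup := by rw [ivDict_keys]; exact PySem.List.nodup_dedup xs
    have hcontains : (ivDict xs).contains d = (decide (d ∈ xs)) := by
      by_cases hd : d ∈ xs
      · simp only [hd, decide_true]
        exact (PySem.Dict.contains_iff_mem_keys _ _).mpr
          (by rw [ivDict_keys, PySem.List.dedup_eq_ofList]; exact (PySem.Set.mem_ofList _ _).mpr hd)
      · simp only [hd, decide_false]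
        apply Bool.eq_false_iff.mpr
        intro hc
        exact hd (by
          have := (PySem.Dict.contains_iff_mem_keys _ _).mp hc
          rw [ivDict_keys, PySem.List.dedup_eq_ofList] at this
          exact (PySem.Set.mem_ofList _ _).mp this)
    have hdedup : PySem.List.dedup (xs ++ [d]) =
        if d ∈ xs then PySem.List.dedup xs else PySem.List.dedup xs ++ [d] := by
      rw [PySem.List.dedup_eq_ofList, PySem.List.dedup_eq_ofList,
        PySem.Set.ofList_eq_foldl, PySem.Set.ofList_eq_foldl, List.foldl_append]
      simp only [List.foldl_cons, List.foldl_nil]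
      have hms : d ∈ List.foldl PySem.Set.add [] xs ↔ d ∈ xs := by
        rw [← PySem.Set.ofList_eq_foldl]; exact PySem.Set.mem_ofList xs d
      show PySem.Set.add (List.foldl PySem.Set.add [] xs) d = _
      simp only [PySem.Set.add]
      by_cases hd : d ∈ xs
      · rw [if_pos (by simpa using hms.mpr hd), if_pos hd]
      · rw [if_neg (by simpa using fun h => hd (hms.mp h)), if_neg hd]
    rw [ivDict_append]
    by_cases hd : d ∈ xs
    · -- existing key: value replaced in place
      rw [hcontains]
      simp only [hd, decide_true, if_true]
      have hget : (ivDict xs).get? d = some (firstI xs d, lastI xs d) := by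
        apply PySem.Dict.get?_of_mem_items _ _ hnodup
        rw [ih, List.mem_map]
        exact ⟨d, by rw [PySem.List.dedup_eq_ofList]; exact (PySem.Set.mem_ofList _ _).mpr hd, rfl⟩
      rw [PySem.Dict.getD_of_get?_eq_some _ _ hget]
      rw [PySem.Dict.items_insert_of_contains _ _ (by rw [hcontains]; simp [hd])]
      rw [ih, hdedup, if_pos hd, List.map_map]
      apply List.map_congr_left
      intro c hcmem
      have hcxs : c ∈ xs := by
        rw [PySem.List.dedup_eq_ofList] at hcmem
        exact (PySem.Set.mem_ofList _ _).mp hcmem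
      by_cases hcd : c = d
      · rw [hcd]
        simp only [Function.comp_apply, beq_self_eq_true, if_true]
        rw [firstI_of_mem xs [d] d (hcd ▸ hcxs), lastI_append_self xs d]
      · simp only [Function.comp_apply]
        rw [if_neg (by simp [hcd])]
        rw [firstI_of_mem xs [d] c hcxs, lastI_append_ne xs c d hcd hcxs]
    · -- fresh key: appended
      rw [hcontains]
      simp only [hd, decide_false, Bool.false_eq_true, if_false]
      rw [PySem.Dict.items_insert_of_not_contains _ _ (by rw [hcontains]; simp [hd])]
      rw [ih, hdedup, if_neg hd, List.map_append]
      congr 1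
      · apply List.map_congr_left
        intro c hcmem
        have hcxs : c ∈ xs := by
          rw [PySem.List.dedup_eq_ofList] at hcmem
          exact (PySem.Set.mem_ofList _ _).mp hcmem
        have hcd : c ≠ d := fun h => hd (h ▸ hcxs)
        rw [firstI_of_mem xs [d] c hcxs, lastI_append_ne xs c d hcd hcxs]
      · simp only [List.map_cons, List.map_nil]
        have h1 : firstI (xs ++ [d]) d = (xs.length : Int) := by
          unfold firstI
          rw [PySem.List.index?_append_singleton_self xs d hd]
          rfl
        rw [h1, lastI_append_self xs d]

-- ---- the ports as prefix folds ----

theorem execute_eq_Afold (string : String) :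
    execute string = (AfoldK string.toList string.toList.length).1 := by
  unfold execute AfoldK
  rw [List.take_length]
  dsimp only
  congr 1
  apply PySem.List.foldl_congr_mem
  intro acc p hp
  have hc : p.2 ∈ string.toList := by
    have := PySem.List.map_snd_enumerate string.toList (0 : Int)
    rw [← this]
    exact List.mem_map_of_mem hp
  show _ = stepA (lastI string.toList) acc p
  unfold stepA
  have : (lastDict string.toList).getD p.2 0 = lastI string.toList p.2 := by
    apply PySem.Dict.getD_of_get?_eq_some
    rw [lastDict_get?, if_pos hc]
  show (if p.1 = max acc.2.2 ((lastDict string.toList).getD p.2 0)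
      then (acc.1 ++ [acc.2.1 + 1], 0, max acc.2.2 ((lastDict string.toList).getD p.2 0))
      else (acc.1, acc.2.1 + 1, max acc.2.2 ((lastDict string.toList).getD p.2 0))) = _
  rw [this]

theorem execute_alt_eq_Bfold (string : String) :
    execute_alt string = (BfoldK string.toList string.toList.length).map segLen := by
  unfold execute_alt BfoldK
  rw [List.take_length]
  dsimp only
  have hvals : (ivDict string.toList).values =
      (PySem.List.dedup string.toList).map (fun c => (firstI string.toList c, lastI string.toList c)) := by
    show (ivDict string.toList).items.map (·.2) = _
    rw [ivDict_items, List.map_map]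
    rfl
  show ((ivDict string.toList).values.foldl _ []).map _ = _
  rw [hvals, List.foldl_map]
  rfl

-- ---- members of take give earlier positions ----

theorem mem_take_getElem (cs : List Char) (k : Nat) (c : Char) (hc : c ∈ cs.take k) :
    ∃ j, ∃ (hj : j < cs.length), j < k ∧ cs[j] = c := by
  obtain ⟨j, hjlt, hjeq⟩ := List.getElem_of_mem hc
  have hjk : j < k := lt_of_lt_of_le hjlt (by simp [List.length_take])
  have hjn : j < cs.length := by
    have := List.length_take_le k cs
    simp only [List.length_take] at hjlt
    omega
  exact ⟨j, hjn, hjk, by rw [← hjeq]; simp⟩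

-- ---- prefix step laws ----

theorem Afold_succ (cs : List Char) (k : Nat) (hk : k < cs.length) :
    AfoldK cs (k + 1) = stepA (lastI cs) (AfoldK cs k) ((k : Int), cs[k]) := by
  unfold AfoldK
  rw [List.take_succ, List.getElem?_eq_getElem hk]
  simp only [Option.toList_some]
  rw [PySem.List.enumerate_append, List.foldl_append]
  simp [PySem.List.enumerate, List.length_take, Nat.min_eq_left (le_of_lt hk)]

theorem Bfold_succ (cs : List Char) (k : Nat) (hk : k < cs.length) :
    BfoldK cs (k + 1) =
      if cs[k] ∈ cs.take k then BfoldK cs k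
      else stepB (BfoldK cs k) (firstI cs cs[k], lastI cs cs[k]) := by
  unfold BfoldK
  rw [List.take_succ, List.getElem?_eq_getElem hk]
  simp only [Option.toList_some]
  have hdedup : PySem.List.dedup (cs.take k ++ [cs[k]]) =
      if cs[k] ∈ cs.take k then PySem.List.dedup (cs.take k)
      else PySem.List.dedup (cs.take k) ++ [cs[k]] := by
    rw [PySem.List.dedup_eq_ofList, PySem.List.dedup_eq_ofList,
      PySem.Set.ofList_eq_foldl, PySem.Set.ofList_eq_foldl, List.foldl_append]
    simp only [List.foldl_cons, List.foldl_nil]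
    have hms : cs[k] ∈ List.foldl PySem.Set.add [] (cs.take k) ↔ cs[k] ∈ cs.take k := by
      rw [← PySem.Set.ofList_eq_foldl]; exact PySem.Set.mem_ofList _ _
    show PySem.Set.add (List.foldl PySem.Set.add [] (cs.take k)) cs[k] = _
    simp only [PySem.Set.add]
    by_cases hd : cs[k] ∈ cs.take k
    · rw [if_pos (by simpa using hms.mpr hd), if_pos hd]
    · rw [if_neg (by simpa using fun h => hd (hms.mp h)), if_neg hd]
  rw [hdedup]
  by_cases hd : cs[k] ∈ cs.take k
  · rw [if_pos hd, if_pos hd]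
  · rw [if_neg hd, if_neg hd, List.foldl_append]
    simp

-- ---- the main invariant ----

theorem main_inv (cs : List Char) : ∀ k : Nat, 1 ≤ k → k ≤ cs.length →
    ∃ segs₀ st en, BfoldK cs k = segs₀ ++ [(st, en)] ∧
      (AfoldK cs k).2.2 = en ∧
      (k : Int) - 1 ≤ en ∧ en ≤ (cs.length : Int) - 1 ∧ 0 ≤ st ∧ st ≤ (k : Int) - 1 ∧
      (∀ j : Nat, ∀ (hj : j < cs.length), j < k → lastI cs cs[j] ≤ en) ∧
      (if en = (k : Int) - 1
        then (AfoldK cs k).2.1 = 0 ∧ (AfoldK cs k).1 = (segs₀ ++ [(st, en)]).map segLen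
        else (AfoldK cs k).2.1 = (k : Int) - st ∧ (AfoldK cs k).1 = segs₀.map segLen) := by
  intro k
  induction k with
  | zero => intro h; omega
  | succ k ih =>
    intro _ hk1
    by_cases hk0 : k = 0
    · -- base case k+1 = 1
      subst hk0
      have hn : 0 < cs.length := by omega
      have hA : AfoldK cs 1 = stepA (lastI cs) (AfoldK cs 0) (0, cs[0]) := by
        have := Afold_succ cs 0 hn; simpa using this
      have hB : BfoldK cs 1 = stepB (BfoldK cs 0) (firstI cs cs[0], lastI cs cs[0]) := by
        have := Bfold_succ cs 0 hn; simpa using this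
      have hA0 : AfoldK cs 0 = ([], 0, 0) := by simp [AfoldK]
      have hB0 : BfoldK cs 0 = [] := by simp [BfoldK, PySem.List.dedup]
      have hf0 : firstI cs cs[0] = 0 := firstI_fresh cs 0 hn (by simp)
      have hge : (0 : Int) ≤ lastI cs cs[0] := by simpa using lastI_ge cs 0 hn
      have hle : lastI cs cs[0] ≤ (cs.length : Int) - 1 :=
        (lastI_bounds cs cs[0] (cs.getElem_mem hn)).2
      refine ⟨[], 0, lastI cs cs[0], ?_, ?_, by omega, hle, le_refl _, by omega, ?_, ?_⟩
      · rw [hB, hB0, hf0]; rfl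
      · rw [hA, hA0]
        simp only [stepA]
        rw [max_eq_right hge]
        split <;> rfl
      · intro j hj hj1
        interval_cases j
        exact le_refl _
      · rw [hA, hA0]
        simp only [stepA]
        rw [max_eq_right hge]
        split_ifs with h1 h2 h2 <;> refine ⟨?_, ?_⟩ <;> simp [segLen] <;> omega
    · -- inductive step: k ≥ 1
      have hk : k < cs.length := by omega
      obtain ⟨segs₀, st, en, hB, hptr, hen1, hen2, hst0, hst1, hall, hbr⟩ :=
        ih (by omega) (by omega)
      have hA : AfoldK cs (k + 1) = stepA (lastI cs) (AfoldK cs k) ((k : Int), cs[k]) :=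
        Afold_succ cs k hk
      have hlge : (k : Int) ≤ lastI cs cs[k] := lastI_ge cs k hk
      have hlle : lastI cs cs[k] ≤ (cs.length : Int) - 1 :=
        (lastI_bounds cs cs[k] (cs.getElem_mem hk)).2
      by_cases hmem : cs[k] ∈ cs.take k
      · -- NON-FRESH: B unchanged, A's pointer absorbs last ≤ en
        have hBeq : BfoldK cs (k + 1) = BfoldK cs k := by
          rw [Bfold_succ cs k hk, if_pos hmem]
        obtain ⟨j, hj, hjk, hjeq⟩ := mem_take_getElem cs k cs[k] hmem
        have hlen : lastI cs cs[k] ≤ en := by rw [← hjeq]; exact hall j hj hjk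
        have henk : (k : Int) ≤ en := le_trans hlge hlen
        rw [if_neg (by omega)] at hbr
        obtain ⟨hsz, hres⟩ := hbr
        have hmax : max (AfoldK cs k).2.2 (lastI cs cs[k]) = en := by rw [hptr]; omega
        refine ⟨segs₀, st, en, by rw [hBeq, hB], ?_, by push_cast; omega, hen2, hst0,
          by push_cast; omega, ?_, ?_⟩
        · rw [hA]
          simp only [stepA]
          rw [hmax]
          split <;> rfl
        · intro j' hj' hj'k
          rcases Nat.lt_succ_iff_lt_or_eq.mp hj'k with h | h
          · exact hall j' hj' h
          · subst h; exact hlen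
        · rw [hA]
          simp only [stepA]
          rw [hmax, hsz]
          by_cases hemit : (k : Int) = en
          · rw [if_pos hemit, if_pos (show en = ((k + 1 : Nat) : Int) - 1 by push_cast; omega)]
            refine ⟨rfl, ?_⟩
            show (AfoldK cs k).1 ++ [(k : Int) - st + 1] = _
            rw [hres, List.map_append]
            congr 1
            simp only [List.map_cons, List.map_nil, segLen]
            rw [hemit]
          · rw [if_neg hemit, if_neg (show ¬ en = ((k + 1 : Nat) : Int) - 1 by push_cast; omega)]
            constructor
            · show (k : Int) - st + 1 = ((k + 1 : Nat) : Int) - st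
              push_cast; ring
            · exact hres
      · -- FRESH: B processes the interval (k, lastI cs cs[k])
        have hf : firstI cs cs[k] = (k : Int) := firstI_fresh cs k hk hmem
        have hBstep : BfoldK cs (k + 1) = stepB (BfoldK cs k) ((k : Int), lastI cs cs[k]) := by
          rw [Bfold_succ cs k hk, if_neg hmem, hf]
        have hlast : (segs₀ ++ [(st, en)]).getLast? = some (st, en) := List.getLast?_concat
        by_cases hbound : en = (k : Int) - 1
        · -- boundary: close the current segment, start a new one
          rw [if_pos hbound] at hbr
          obtain ⟨hsz, hres⟩ := hbr
          have hBnew : BfoldK cs (k + 1) = (segs₀ ++ [(st, en)]) ++ [((k : Int), lastI cs cs[k])] := by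
            rw [hBstep, hB]
            simp only [stepB]
            rw [hlast]
            exact if_neg (by omega)
          have hmax : max (AfoldK cs k).2.2 (lastI cs cs[k]) = lastI cs cs[k] := by
            rw [hptr]; omega
          refine ⟨segs₀ ++ [(st, en)], (k : Int), lastI cs cs[k], hBnew, ?_,
            by push_cast; omega, hlle, by positivity, by push_cast; omega, ?_, ?_⟩
          · rw [hA]
            simp only [stepA]
            rw [hmax]
            split <;> rfl
          · intro j' hj' hj'k
            rcases Nat.lt_succ_iff_lt_or_eq.mp hj'k with h | h
            · exact le_trans (hall j' hj' h) (by omega)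
            · subst h; exact le_refl _
          · rw [hA]
            simp only [stepA]
            rw [hmax, hsz]
            by_cases hemit : (k : Int) = lastI cs cs[k]
            · rw [if_pos hemit,
                if_pos (show lastI cs cs[k] = ((k + 1 : Nat) : Int) - 1 by push_cast; omega)]
              refine ⟨rfl, ?_⟩
              show (AfoldK cs k).1 ++ [(0 : Int) + 1] = _
              rw [hres, List.map_append]
              congr 1
              simp only [List.map_cons, List.map_nil, segLen]
              rw [← hemit]
              simp [segLen]
            · rw [if_neg hemit,
                if_neg (show ¬ lastI cs cs[k] = ((k + 1 : Nat) : Int) - 1 by push_cast; omega)]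
              constructor
              · show (0 : Int) + 1 = ((k + 1 : Nat) : Int) - (k : Int)
                push_cast; ring
              · exact hres
        · -- no boundary: extend the current segment
          have henk : (k : Int) ≤ en := by omega
          rw [if_neg hbound] at hbr
          obtain ⟨hsz, hres⟩ := hbr
          have hBnew : BfoldK cs (k + 1) = segs₀ ++ [(st, max en (lastI cs cs[k]))] := by
            rw [hBstep, hB]
            simp only [stepB]
            rw [hlast]
            show (if (k : Int) ≤ en then (segs₀ ++ [(st, en)]).dropLast ++ [(st, max en (lastI cs cs[k]))]
                  else segs₀ ++ [(st, en)] ++ [((k : Int), lastI cs cs[k])]) = _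
            rw [if_pos henk, List.dropLast_concat]
          have hmax : max (AfoldK cs k).2.2 (lastI cs cs[k]) = max en (lastI cs cs[k]) := by
            rw [hptr]
          refine ⟨segs₀, st, max en (lastI cs cs[k]), hBnew, ?_, by push_cast; omega,
            max_le hen2 hlle, hst0, by push_cast; omega, ?_, ?_⟩
          · rw [hA]
            simp only [stepA]
            rw [hmax]
            split <;> rfl
          · intro j' hj' hj'k
            rcases Nat.lt_succ_iff_lt_or_eq.mp hj'k with h | h
            · exact le_trans (hall j' hj' h) (le_max_left _ _)
            · subst h; exact le_max_right _ _
          · rw [hA]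
            simp only [stepA]
            rw [hmax, hsz]
            by_cases hemit : (k : Int) = max en (lastI cs cs[k])
            · rw [if_pos hemit,
                if_pos (show max en (lastI cs cs[k]) = ((k + 1 : Nat) : Int) - 1 by push_cast; omega)]
              refine ⟨rfl, ?_⟩
              show (AfoldK cs k).1 ++ [(k : Int) - st + 1] = _
              rw [hres, List.map_append]
              congr 1
              simp only [List.map_cons, List.map_nil, segLen]
              rw [hemit]
            · rw [if_neg hemit,
                if_neg (show ¬ max en (lastI cs cs[k]) = ((k + 1 : Nat) : Int) - 1 by push_cast; omega)]
              constructor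
              · show (k : Int) - st + 1 = ((k + 1 : Nat) : Int) - st
                push_cast; ring
              · exact hres

-- ===== VERDICT (by name: the statement is the Claim_ definition above) =====
theorem execute_spec : Claim_equal_execute := by
  intro string _
  unfold Spec_execute
  rw [execute_eq_Afold, execute_alt_eq_Bfold]
  by_cases hnil : string.toList.length = 0
  · have : string.toList = [] := List.eq_nil_of_length_eq_zero hnil
    rw [this]
    simp [AfoldK, BfoldK, PySem.List.dedup]
  · obtain ⟨segs₀, st, en, hB, hptr, hen1, hen2, hst0, hst1, hall, hbr⟩ :=
      main_inv string.toList string.toList.length (by omega) (le_refl _)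
    have hen : en = (string.toList.length : Int) - 1 := by omega
    rw [if_pos hen] at hbr
    rw [hbr.2, hB]
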